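-- pv_equiv track=rewrite | github.com/rheft/advent-of-code-2020 | day09/day9.py | find_invalid_number
-- ===== SOURCE A (Python) =====
-- def value_meets_criteria(previous_values: set, target_value: int) -> bool:
--     """Determine if the next value in the list meets the expected criteria."""
--     for value in previous_values:
--         if target_value-value in previous_values:
--             return True
--
--     return False
--
-- def find_invalid_number(value_list: list, max_range: int) -> int:
--     """Given a list of values and a range to cover, determine if the next value in the list is valid defined by the criteria function."""
--     previous_values = []
--     for value in value_list:
--         if len(previous_values) >= max_range:
--             if value_meets_criteria(set(previous_values), value):
--                 del previous_values[0]
--             else: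
--                 break
--
--         previous_values.append(value)
--
--     return value
-- ===== SOURCE B (Python) =====
-- def find_invalid_number(value_list: list, max_range: int) -> int:
--     """Return the first value that is not a sum of two (possibly equal) values
--     from the window of the previous max_range values; otherwise the last value."""
--     for i, value in enumerate(value_list):
--         if i >= max_range:
--             window = value_list[i - max_range:i]
--             sums = {a + b for a in window for b in window}
--             if value not in sums:
--                 return value
--     return value_list[-1]
-- ===== Notes on version B (the rewrite author's own statement) =====
-- stated objective: alternative
-- what changed: B keeps no mutable window list: it indexes with enumerate, takes each window as a slice of the input, precomputes the full set of pairwise sums of the window and tests membership, returning early on the first failure instead of A's per-candidate two-sum probing over a maintained list with del/append.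
import Mathlib
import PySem

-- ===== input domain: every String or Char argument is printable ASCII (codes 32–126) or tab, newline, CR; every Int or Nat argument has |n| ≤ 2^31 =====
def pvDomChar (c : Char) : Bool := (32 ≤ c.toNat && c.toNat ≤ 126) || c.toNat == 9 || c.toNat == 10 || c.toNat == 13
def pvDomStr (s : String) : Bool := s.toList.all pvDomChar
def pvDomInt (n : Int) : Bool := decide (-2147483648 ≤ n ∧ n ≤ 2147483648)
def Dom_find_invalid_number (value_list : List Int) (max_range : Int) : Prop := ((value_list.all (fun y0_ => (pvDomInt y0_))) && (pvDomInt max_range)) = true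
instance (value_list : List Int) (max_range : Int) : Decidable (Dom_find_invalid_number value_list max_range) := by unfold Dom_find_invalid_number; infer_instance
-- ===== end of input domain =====

-- B replaces A's maintained window list and per-candidate two-sum probing by slicing each
-- window out of the input and testing membership in the precomputed set of all pairwise sums
-- (objective: alternative decomposition, similar cost).

-- ===== PORT A =====
-- 'for value in previous_values: if target_value-value in previous_values: return True'
-- (iterates a Python set; the boolean result is independent of the set's iteration order)
def vmc_loop (all : List Int) (rest : List Int) (target : Int) : Bool :=
  match rest with
  | [] => false
  | v :: t => if all.contains (target - v) then true else vmc_loop all t target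

def value_meets_criteria (previous_values : PySem.Set Int) (target : Int) : Bool :=
  vmc_loop previous_values previous_values target

-- the loop of A; 'last' is the Python loop variable 'value' that A returns after the loop
-- (0 is its placeholder for the empty list, where Python A raises NameError — excluded by Pre_)
def finA_loop (prev : List Int) (rest : List Int) (last : Int) (max_range : Int) : Int :=
  match rest with
  | [] => last
  | v :: t =>
    if (prev.length : Int) ≥ max_range then
      if value_meets_criteria (PySem.Set.ofList prev) v then
        finA_loop (prev.drop 1 ++ [v]) t v max_range
      else v
    else finA_loop (prev ++ [v]) t v max_range

def find_invalid_number (value_list : List Int) (max_range : Int) : Int :=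
  finA_loop [] value_list 0 max_range

-- ===== PORT B =====
-- enumerate-indexed loop: window = value_list[i-max_range:i], sums = {a+b for a in window for b in window}
def finB_loop (value_list : List Int) (rest : List Int) (i : Int) (max_range : Int) : Int :=
  match rest with
  | [] => (PySem.List.pyGet? value_list (-1)).getD 0   -- value_list[-1]; IndexError (empty list) excluded by Pre_
  | v :: t =>
    if i ≥ max_range then
      let window := PySem.List.slice value_list (some (i - max_range)) (some i)
      let sums : PySem.Set Int :=
        PySem.Set.ofList (window.flatMap (fun a => window.map (fun b => a + b)))
      if !(PySem.Set.contains sums v) then v else finB_loop value_list t (i + 1) max_range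
    else finB_loop value_list t (i + 1) max_range

def find_invalid_number_alt (value_list : List Int) (max_range : Int) : Int :=
  finB_loop value_list value_list 0 max_range

-- ===== PRECONDITION & SPEC =====
-- On the empty list Python A raises NameError ('value' never assigned) and Python B raises IndexError.
def Pre_find_invalid_number (value_list : List Int) (max_range : Int) : Prop := value_list ≠ []
instance (value_list : List Int) (max_range : Int) : Decidable (Pre_find_invalid_number value_list max_range) := by unfold Pre_find_invalid_number; infer_instance
def pvWitness_find_invalid_number : List Int × Int := ([35, 20, 15, 25, 47, 40, 62], 5)

def Spec_find_invalid_number (value_list : List Int) (max_range : Int) (out : Int) : Prop := out = find_invalid_number_alt value_list max_range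
instance (value_list : List Int) (max_range : Int) (out : Int) : Decidable (Spec_find_invalid_number value_list max_range out) := by unfold Spec_find_invalid_number; infer_instance

-- ===== CLAIM (what is proved, stated in full; the proofs are below) =====
def Claim_equal_find_invalid_number : Prop := ∀ (value_list : List Int) (max_range : Int), Dom_find_invalid_number value_list max_range → Pre_find_invalid_number value_list max_range → Spec_find_invalid_number value_list max_range (find_invalid_number value_list max_range)

-- ===== LEMMAS AND PROOFS =====

lemma vmc_loop_eq_any (all rest : List Int) (target : Int) :
    vmc_loop all rest target = rest.any (fun a => all.contains (target - a)) := by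
  induction rest with
  | nil => rfl
  | cons v t ih =>
    by_cases h : all.contains (target - v) <;> simp [vmc_loop, List.any_cons, ih, h]

lemma criteria_iff (prev : List Int) (v : Int) :
    value_meets_criteria (PySem.Set.ofList prev) v = true ↔ ∃ a ∈ prev, (v - a) ∈ prev := by
  unfold value_meets_criteria
  rw [vmc_loop_eq_any, List.any_eq_true]
  constructor
  · rintro ⟨a, ha, hc⟩
    exact ⟨a, (PySem.Set.mem_ofList _ _).1 ha,
      (PySem.Set.mem_ofList _ _).1 (List.contains_iff_mem.mp hc)⟩
  · rintro ⟨a, ha, hb⟩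
    exact ⟨a, (PySem.Set.mem_ofList _ _).2 ha,
      List.contains_iff_mem.mpr ((PySem.Set.mem_ofList _ _).2 hb)⟩

lemma sums_iff (window : List Int) (v : Int) :
    PySem.Set.contains (PySem.Set.ofList (window.flatMap (fun a => window.map (fun b => a + b)))) v = true
      ↔ ∃ a ∈ window, (v - a) ∈ window := by
  rw [PySem.Set.contains_iff, PySem.Set.mem_ofList, List.mem_flatMap]
  constructor
  · rintro ⟨a, ha, hv⟩
    rcases List.mem_map.1 hv with ⟨b, hb, hab⟩
    exact ⟨a, ha, by simpa [← hab] using hb⟩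
  · rintro ⟨a, ha, hb⟩
    exact ⟨a, ha, List.mem_map.2 ⟨v - a, hb, by ring⟩⟩

lemma loop_eq (orig : List Int) (m : Nat) :
    ∀ (rest : List Int) (i : Nat) (prev : List Int) (last : Int),
    rest = orig.drop i → prev = (orig.take i).drop (i - m) → i ≤ orig.length →
    (i = orig.length → last = orig.getLast?.getD 0) →
    finA_loop prev rest last (m : Int) = finB_loop orig rest (i : Int) (m : Int) := by
  intro rest
  induction rest with
  | nil =>
    intro i prev last hrest hprev hi hlast
    have hieq : i = orig.length := by
      have := List.drop_eq_nil_iff.mp hrest.symm; omega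
    simp [finA_loop, finB_loop, hlast hieq, PySem.List.pyGet?_neg_one]
  | cons v t ih =>
    intro i prev last hrest hprev hi hlast
    have hlt : i < orig.length := by
      by_contra h
      have hnil : orig.drop i = [] := List.drop_eq_nil_iff.mpr (by omega)
      rw [hnil] at hrest; exact List.cons_ne_nil _ _ hrest
    have hsplit : v :: t = orig[i] :: orig.drop (i + 1) := by
      rw [hrest, List.drop_eq_getElem_cons hlt]
    have hv : orig[i] = v := by injection hsplit with h1 _; exact h1.symm
    have ht : t = orig.drop (i + 1) := by injection hsplit with _ h2
    have hlen : prev.length = i - (i - m) := by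
      subst hprev; simp [List.length_drop, List.length_take]; omega
    have hcond : ((prev.length : Int) ≥ (m : Int)) ↔ ((i : Int) ≥ (m : Int)) := by
      rw [hlen]; constructor <;> intro h <;> (push_cast at h ⊢; omega)
    unfold finA_loop finB_loop
    by_cases hcase : (m : Int) ≤ (i : Int)
    · have hmi : m ≤ i := by exact_mod_cast hcase
      have hwin : PySem.List.slice orig (some ((i : Int) - (m : Int))) (some (i : Int)) = prev := by
        have hcast : (i : Int) - (m : Int) = ((i - m : Nat) : Int) := by push_cast; omega
        rw [hcast, PySem.List.slice_natCast]
        rw [hprev, List.drop_take]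
      have hAcond : ((prev.length : Int) ≥ (m : Int)) := hcond.mpr hcase
      rw [if_pos hAcond, if_pos hcase]
      have hcrit : value_meets_criteria (PySem.Set.ofList prev) v
          = PySem.Set.contains (PySem.Set.ofList
              ((PySem.List.slice orig (some ((i:Int) - (m:Int))) (some (i:Int))).flatMap
                (fun a => (PySem.List.slice orig (some ((i:Int) - (m:Int))) (some (i:Int))).map (fun b => a + b)))) v := by
        rw [hwin]
        by_cases h : ∃ a ∈ prev, (v - a) ∈ prev
        · rw [(criteria_iff prev v).mpr h, (sums_iff prev v).mpr h]
        · have h1 : value_meets_criteria (PySem.Set.ofList prev) v = false := by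
            cases hb : value_meets_criteria (PySem.Set.ofList prev) v
            · rfl
            · exact absurd ((criteria_iff prev v).mp hb) h
          have h2 : PySem.Set.contains (PySem.Set.ofList (prev.flatMap (fun a => prev.map (fun b => a + b)))) v = false := by
            cases hb : PySem.Set.contains (PySem.Set.ofList (prev.flatMap (fun a => prev.map (fun b => a + b)))) v
            · rfl
            · exact absurd ((sums_iff prev v).mp hb) h
          rw [h1, h2]
      by_cases hc : value_meets_criteria (PySem.Set.ofList prev) v = true
      · -- criteria passes: both recurse
        have hne : prev ≠ [] := by
          rcases (criteria_iff prev v).1 hc with ⟨a, ha, _⟩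
          exact List.ne_nil_of_mem ha
        have hm1 : 1 ≤ m := by
          by_contra h
          have hm0 : m = 0 := by omega
          subst hm0
          exact hne (by rw [hprev]; simp)
        rw [hc]
        have hcB : PySem.Set.contains (PySem.Set.ofList
              ((PySem.List.slice orig (some ((i:Int) - (m:Int))) (some (i:Int))).flatMap
                (fun a => (PySem.List.slice orig (some ((i:Int) - (m:Int))) (some (i:Int))).map (fun b => a + b)))) v = true := by
          rw [← hcrit]; exact hc
        simp only [hcB, Bool.not_true, Bool.false_eq_true, if_false]
        have hstep : prev.drop 1 ++ [v] = (orig.take (i + 1)).drop (i + 1 - m) := by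
          rw [List.take_add_one]
          have hg : orig[i]?.toList = [v] := by
            rw [List.getElem?_eq_getElem hlt, hv]; rfl
          rw [hg, List.drop_append_of_le_length (by simp [List.length_take]; omega)]
          rw [hprev, List.drop_drop]
          congr 2 <;> omega
        have hih := ih (i + 1) (prev.drop 1 ++ [v]) v ht hstep (by omega)
          (by intro h
              rw [← hv, List.getLast?_eq_getElem?, List.getElem?_eq_getElem (by omega)]
              simp; congr 1; omega)
        push_cast at hih ⊢
        exact hih
      · -- criteria fails: both return v
        have hc' : value_meets_criteria (PySem.Set.ofList prev) v = false := by
          cases hb : value_meets_criteria (PySem.Set.ofList prev) v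
          · rfl
          · exact absurd hb hc
        rw [hc']
        have hcB : PySem.Set.contains (PySem.Set.ofList
              ((PySem.List.slice orig (some ((i:Int) - (m:Int))) (some (i:Int))).flatMap
                (fun a => (PySem.List.slice orig (some ((i:Int) - (m:Int))) (some (i:Int))).map (fun b => a + b)))) v = false := by
          rw [← hcrit]; exact hc'
        simp only [hcB]
        simp
    · have hAcond : ¬ ((prev.length : Int) ≥ (m : Int)) := fun h => hcase (hcond.mp h)
      have hmi : i < m := by omega
      rw [if_neg hAcond, if_neg hcase]
      have hstep : prev ++ [v] = (orig.take (i + 1)).drop (i + 1 - m) := by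
        have h0 : i + 1 - m = 0 := by omega
        have h0' : i - m = 0 := by omega
        rw [h0, List.drop_zero, List.take_add_one]
        have hg : orig[i]?.toList = [v] := by
          rw [List.getElem?_eq_getElem hlt, hv]; rfl
        rw [hg, hprev, h0', List.drop_zero]
      have hih := ih (i + 1) (prev ++ [v]) v ht hstep (by omega)
        (by intro h
            rw [← hv, List.getLast?_eq_getElem?, List.getElem?_eq_getElem (by omega)]
            simp; congr 1; omega)
      push_cast at hih ⊢
      exact hih

-- ===== VERDICT (by name: the statement is the Claim_ definition above) =====
theorem find_invalid_number_spec : Claim_equal_find_invalid_number := by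
  intro vl max _ hpre
  unfold Spec_find_invalid_number find_invalid_number find_invalid_number_alt
  by_cases hm : 0 ≤ max
  · obtain ⟨m, rfl⟩ : ∃ m : Nat, max = (m : Int) := ⟨max.toNat, (Int.toNat_of_nonneg hm).symm⟩
    exact loop_eq vl m vl 0 [] 0 (by simp) (by simp) (by omega)
      (fun h => by
        have hnil : vl = [] := List.length_eq_zero_iff.mp h.symm
        simp [hnil])
  · cases vl with
    | nil => exact absurd rfl hpre
    | cons v t =>
      have hA : (([] : List Int).length : Int) ≥ max := by simp; omega
      have hB : (0 : Int) ≥ max := by omega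
      unfold finA_loop finB_loop
      rw [if_pos hA, if_pos hB]
      have hwin : PySem.List.slice (v :: t) (some ((0 : Int) - max)) (some (0 : Int)) = [] := by
        rw [PySem.List.slice_toNat (v :: t) (a := 0 - max) (b := 0) (by omega) (by omega)]
        simp
      simp only [hwin]
      simp [value_meets_criteria, vmc_loop, PySem.Set.ofList, PySem.Set.contains]
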